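-- pv_equiv track=rewrite | github.com/vfd-org/constraint-closure-diagnostics | src/vfd_dash/reports/markdown.py | _generate_files_section
-- ===== SOURCE A (Python) =====
-- from typing import Dict, List, Any, Optional
--
-- def _generate_files_section(files: List[str]) -> str:
--     """Generate files listing section."""
--     sections = ["## Generated Files"]
--
--     figures = [f for f in files if f.startswith("figures/")]
--     data = [f for f in files if f.startswith("data/")]
--     other = [f for f in files if not f.startswith(("figures/", "data/"))]
--
--     if figures:
--         sections.append("### Figures")
--         for f in sorted(figures):
--             sections.append(f"- `{f}`")
--
--     if data:
--         sections.append("### Data Files")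
--         for f in sorted(data):
--             sections.append(f"- `{f}`")
--
--     if other:
--         sections.append("### Other")
--         for f in sorted(other):
--             sections.append(f"- `{f}`")
--
--     return "\n".join(sections)
-- ===== SOURCE B (Python) =====
-- def _rank(f):
--     if f.startswith("figures/"):
--         return 0
--     if f.startswith("data/"):
--         return 1
--     return 2
--
--
-- _HEADERS = ("### Figures", "### Data Files", "### Other")
--
--
-- def _generate_files_section(files):
--     """Generate files listing section: one global sort by (category, path),
--     then a single group-by scan emitting a header whenever the category changes."""
--     lines = ["## Generated Files"]
--     prev = None
--     for f in sorted(files, key=lambda f: (_rank(f), f)):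
--         r = _rank(f)
--         if r != prev:
--             lines.append(_HEADERS[r])
--             prev = r
--         lines.append(f"- `{f}`")
--     return "\n".join(lines)
-- ===== Notes on version B (the rewrite author's own statement) =====
-- stated objective: alternative
-- what changed: Replaces A's three prefix-filter passes plus three independent per-bucket sorts with one global sort keyed by (category rank, path) followed by a single group-by scan that emits a section header whenever the category rank changes.
import Mathlib
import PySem

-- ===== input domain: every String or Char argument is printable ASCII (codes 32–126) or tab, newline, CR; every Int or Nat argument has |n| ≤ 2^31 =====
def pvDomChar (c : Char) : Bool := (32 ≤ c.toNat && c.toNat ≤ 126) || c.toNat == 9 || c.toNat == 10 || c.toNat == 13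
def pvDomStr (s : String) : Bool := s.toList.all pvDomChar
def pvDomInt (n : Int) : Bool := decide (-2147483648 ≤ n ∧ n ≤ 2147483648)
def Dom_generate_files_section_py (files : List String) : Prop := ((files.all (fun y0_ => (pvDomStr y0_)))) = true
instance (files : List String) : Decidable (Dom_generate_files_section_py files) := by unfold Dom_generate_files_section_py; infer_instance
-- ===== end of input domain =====

-- B replaces A's three filter passes + three per-bucket sorts by one global sort
-- keyed by (category rank, path) and a single group-by scan: a different algorithm, same behaviour.


-- ===== PORT A =====
def generate_files_section_py (files : List String) : String :=
  let sections : List String := ["## Generated Files"]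
  let figures := files.filter (fun f => PySem.Str.startswith f "figures/")
  let data := files.filter (fun f => PySem.Str.startswith f "data/")
  let other := files.filter (fun f => !(PySem.Str.startswith f "figures/" || PySem.Str.startswith f "data/"))
  let sections := if figures = [] then sections else
    (PySem.List.sorted figures (fun x => x) false).foldl
      (fun acc f => acc ++ ["- `" ++ f ++ "`"]) (sections ++ ["### Figures"])
  let sections := if data = [] then sections else
    (PySem.List.sorted data (fun x => x) false).foldl
      (fun acc f => acc ++ ["- `" ++ f ++ "`"]) (sections ++ ["### Data Files"])
  let sections := if other = [] then sections else
    (PySem.List.sorted other (fun x => x) false).foldl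
      (fun acc f => acc ++ ["- `" ++ f ++ "`"]) (sections ++ ["### Other"])
  PySem.Str.join "\n" sections

-- ===== PORT B =====
-- _rank: category rank as in Source B
def pvRank (f : String) : Int :=
  if PySem.Str.startswith f "figures/" then 0
  else if PySem.Str.startswith f "data/" then 1
  else 2

-- _HEADERS[r] (tuple of three string literals, indexed by the rank)
def pvHeader (r : Int) : String :=
  if r = 0 then "### Figures" else if r = 1 then "### Data Files" else "### Other"

-- one iteration of Source B's loop: state = (lines, prev)
def pvStep (st : List String × Option Int) (f : String) : List String × Option Int :=
  let r := pvRank f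
  if st.2 = some r then (st.1 ++ ["- `" ++ f ++ "`"], st.2)
  else (st.1 ++ [pvHeader r, "- `" ++ f ++ "`"], some r)

def generate_files_section_py_alt (files : List String) : String :=
  let res := (PySem.List.sorted2 files pvRank (fun x => x) false).foldl pvStep
    (["## Generated Files"], none)
  PySem.Str.join "\n" res.1

-- ===== PRECONDITION & SPEC =====
def Spec_generate_files_section_py (files : List String) (out : String) : Prop := out = generate_files_section_py_alt files
instance (files : List String) (out : String) : Decidable (Spec_generate_files_section_py files out) := by unfold Spec_generate_files_section_py; infer_instance

-- ===== CLAIM =====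
def Claim_equal_generate_files_section_py : Prop := ∀ (files : List String), Dom_generate_files_section_py files → Spec_generate_files_section_py files (generate_files_section_py files)

-- ===== LEMMAS AND PROOFS =====

-- the strict "before" comparison Source B's sort uses (lex on (rank, path))
def pvLt (a b : String) : Bool :=
  decide (pvRank a < pvRank b) || (!decide (pvRank b < pvRank a) && decide (a < b))

-- the corresponding weak order
def pvR (a b : String) : Prop := pvRank a < pvRank b ∨ (pvRank a = pvRank b ∧ a ≤ b)

theorem pvR_of_not_lt {a b : String} (h : pvLt b a = false) : pvR a b := by
  unfold pvLt at h
  unfold pvR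
  simp only [Bool.or_eq_false_iff, Bool.and_eq_false_iff, decide_eq_false_iff_not,
    Bool.not_eq_false', decide_eq_true_eq] at h
  rcases h with ⟨h1, h2⟩
  rcases h2 with h2 | h2
  · left; omega
  · by_cases hr : pvRank a < pvRank b
    · left; exact hr
    · right; exact ⟨by omega, le_of_not_gt h2⟩

theorem pvR_of_lt {a b : String} (h : pvLt a b = true) : pvR a b := by
  unfold pvLt at h
  unfold pvR
  simp only [Bool.or_eq_true, Bool.and_eq_true, decide_eq_true_eq, Bool.not_eq_true',
    decide_eq_false_iff_not] at h
  rcases h with h | ⟨h1, h2⟩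
  · left; exact h
  · by_cases hr : pvRank a < pvRank b
    · left; exact hr
    · right; exact ⟨by omega, le_of_lt h2⟩

theorem pvR_trans {a b c : String} (h1 : pvR a b) (h2 : pvR b c) : pvR a c := by
  unfold pvR at *
  rcases h1 with h1 | ⟨h1, h1'⟩ <;> rcases h2 with h2 | ⟨h2, h2'⟩
  · left; omega
  · left; omega
  · left; omega
  · right; exact ⟨by omega, le_trans h1' h2'⟩

theorem pvR_antisymm {a b : String} (h1 : pvR a b) (h2 : pvR b a) : a = b := by
  unfold pvR at *
  rcases h1 with h1 | ⟨h1, h1'⟩ <;> rcases h2 with h2 | ⟨h2, h2'⟩ <;> first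
    | omega
    | exact le_antisymm h1' h2'

-- insertBy with pvLt preserves Pairwise pvR
theorem pv_insertBy_pairwise (x : String) (ys : List String)
    (h : List.Pairwise pvR ys) :
    List.Pairwise pvR (PySem.List.insertBy pvLt x ys) := by
  induction ys with
  | nil => simp [PySem.List.insertBy]
  | cons y t ih =>
    rw [List.pairwise_cons] at h
    rw [PySem.List.insertBy.eq_2]
    by_cases hb : pvLt x y = true
    · rw [if_pos hb]
      have hxy : pvR x y := pvR_of_lt hb
      refine List.pairwise_cons.2 ⟨?_, List.pairwise_cons.2 h⟩
      intro z hz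
      rcases List.mem_cons.1 hz with rfl | hz
      · exact hxy
      · exact pvR_trans hxy (h.1 z hz)
    · rw [if_neg hb]
      have hyx : pvR y x := pvR_of_not_lt (by simpa using hb)
      refine List.pairwise_cons.2 ⟨?_, ih h.2⟩
      intro z hz
      rcases (PySem.List.mem_insertBy pvLt x z t).1 hz with rfl | hz
      · exact hyx
      · exact h.1 z hz

theorem pv_foldl_insertBy_pairwise (xs : List String) :
    ∀ acc : List String, List.Pairwise pvR acc →
      List.Pairwise pvR (xs.foldl (fun acc x => PySem.List.insertBy pvLt x acc) acc) := by
  induction xs with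
  | nil => intro acc h; simpa using h
  | cons x t ih =>
    intro acc h
    exact ih _ (pv_insertBy_pairwise x acc h)

theorem pv_sorted2_pairwise (files : List String) :
    List.Pairwise pvR (PySem.List.sorted2 files pvRank (fun x => x) false) := by
  have he : PySem.List.sorted2 files pvRank (fun x => x) false =
      files.foldl (fun acc x => PySem.List.insertBy pvLt x acc) [] := rfl
  rw [he]
  exact pv_foldl_insertBy_pairwise files [] (by simp)

-- a path starting with "figures/" cannot start with "data/"
theorem pv_fig_not_data (x : String) (h : PySem.Str.startswith x "figures/" = true) :
    PySem.Str.startswith x "data/" = false := by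
  simp only [PySem.Str.startswith, PySem.Chars.startswith] at h ⊢
  cases hx : x.toList with
  | nil => simp [hx] at h
  | cons c cs =>
    simp [hx, List.isPrefixOf] at h ⊢
    intro hc
    rw [← h.1] at hc
    exact absurd hc (by decide)

-- rank facts for the three buckets
theorem pv_rank_fig {f : String} (h : PySem.Str.startswith f "figures/" = true) : pvRank f = 0 := by
  unfold pvRank; rw [h]; simp

theorem pv_rank_data {f : String} (h : PySem.Str.startswith f "data/" = true) : pvRank f = 1 := by
  have hf : PySem.Str.startswith f "figures/" = false := by
    cases hfig : PySem.Str.startswith f "figures/"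
    · rfl
    · rw [pv_fig_not_data f hfig] at h; exact absurd h (by simp)
  unfold pvRank; rw [hf, h]; simp

theorem pv_rank_other {f : String}
    (h : (!(PySem.Str.startswith f "figures/" || PySem.Str.startswith f "data/")) = true) :
    pvRank f = 2 := by
  have h' : (PySem.Str.startswith f "figures/" || PySem.Str.startswith f "data/") = false := by
    simpa using h
  obtain ⟨h1, h2⟩ := Bool.or_eq_false_iff.1 h'
  unfold pvRank; rw [h1, h2]; simp

-- a bucket's header-and-bullets block
def pvBlk (r : Int) (xs : List String) : List String :=
  if xs = [] then [] else pvHeader r :: xs.map (fun f => "- `" ++ f ++ "`")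

-- the scan over a list of constant rank r with prev already = some r: only bullets
theorem pv_scan_const (r : Int) (xs : List String) (h : ∀ x ∈ xs, pvRank x = r) :
    ∀ lines : List String,
      xs.foldl pvStep (lines, some r) =
        (lines ++ xs.map (fun f => "- `" ++ f ++ "`"), some r) := by
  induction xs with
  | nil => intro lines; simp
  | cons x t ih =>
    intro lines
    have hx : pvRank x = r := h x (by simp)
    simp only [List.foldl_cons, pvStep, hx, reduceIte]
    rw [ih (fun y hy => h y (by simp [hy]))]
    simp

-- the scan over a constant-rank block entered with prev ≠ some r
theorem pv_scan_block (r : Int) (xs : List String) (h : ∀ x ∈ xs, pvRank x = r)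
    (p : Option Int) (hp : p ≠ some r) (lines : List String) :
    xs.foldl pvStep (lines, p) =
      (lines ++ pvBlk r xs, if xs = [] then p else some r) := by
  cases xs with
  | nil => simp [pvBlk]
  | cons x t =>
    have hx : pvRank x = r := h x (by simp)
    simp only [List.foldl_cons, pvStep, hx]
    rw [if_neg (by simpa using hp)]
    rw [pv_scan_const r t (fun y hy => h y (by simp [hy]))]
    simp [pvBlk]

-- A's sorted-bucket if-block equals appending the bucket's pvBlk
theorem pv_Ablock (r : Int) (l : List String) (s : List String) :
    (if l = [] then s else
      (PySem.List.sorted l (fun x => x) false).foldl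
        (fun acc f => acc ++ ["- `" ++ f ++ "`"]) (s ++ [pvHeader r])) =
    s ++ pvBlk r (PySem.List.sorted l (fun x => x) false) := by
  by_cases h : l = []
  · rw [if_pos h]
    have : PySem.List.sorted l (fun x : String => x) false = [] :=
      (PySem.List.sorted_eq_nil_iff l (fun x => x) false).2 h
    simp [this, pvBlk]
  · rw [if_neg h, PySem.List.foldl_append_singleton_eq_map]
    have hne : PySem.List.sorted l (fun x : String => x) false ≠ [] := by
      simpa [PySem.List.sorted_eq_nil_iff] using h
    simp [pvBlk, hne]

-- ===== main equality =====
theorem generate_files_section_py_eq_alt (files : List String) :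
    generate_files_section_py files = generate_files_section_py_alt files := by
  unfold generate_files_section_py generate_files_section_py_alt
  simp only []
  -- abbreviations
  set figures := files.filter (fun f => PySem.Str.startswith f "figures/") with hfigdef
  set data := files.filter (fun f => PySem.Str.startswith f "data/") with hdatdef
  set other := files.filter (fun f => !(PySem.Str.startswith f "figures/" || PySem.Str.startswith f "data/")) with hothdef
  set sf := PySem.List.sorted figures (fun x => x) false with hsf
  set sd := PySem.List.sorted data (fun x => x) false with hsd
  set so := PySem.List.sorted other (fun x => x) false with hso
  -- rank facts
  have hrf : ∀ x ∈ sf, pvRank x = 0 := by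
    intro x hx
    have hm := (PySem.List.mem_sorted figures (fun y => y) false x).1 hx
    exact pv_rank_fig (List.mem_filter.1 hm).2
  have hrd : ∀ x ∈ sd, pvRank x = 1 := by
    intro x hx
    have hm := (PySem.List.mem_sorted data (fun y => y) false x).1 hx
    exact pv_rank_data (List.mem_filter.1 hm).2
  have hro : ∀ x ∈ so, pvRank x = 2 := by
    intro x hx
    have hm := (PySem.List.mem_sorted other (fun y => y) false x).1 hx
    exact pv_rank_other (List.mem_filter.1 hm).2
  -- Source B's globally sorted list IS the concatenation of A's three sorted buckets
  have hkey : PySem.List.sorted2 files pvRank (fun x => x) false = sf ++ sd ++ so := by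
    apply List.eq_of_perm_of_sorted (le := pvR)
    · intro a b _ _ h1 h2; exact pvR_antisymm h1 h2
    · exact pv_sorted2_pairwise files
    · rw [List.append_assoc]
      apply List.pairwise_append.2
      refine ⟨?_, ?_, ?_⟩
      · exact (PySem.List.sorted_pairwise figures (fun x => x)).imp_of_mem
          (fun {a b} ha hb hab => Or.inr ⟨by rw [hrf a ha, hrf b hb], hab⟩)
      · apply List.pairwise_append.2
        refine ⟨?_, ?_, ?_⟩
        · exact (PySem.List.sorted_pairwise data (fun x => x)).imp_of_mem
            (fun {a b} ha hb hab => Or.inr ⟨by rw [hrd a ha, hrd b hb], hab⟩)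
        · exact (PySem.List.sorted_pairwise other (fun x => x)).imp_of_mem
            (fun {a b} ha hb hab => Or.inr ⟨by rw [hro a ha, hro b hb], hab⟩)
        · intro a ha b hb
          exact Or.inl (by rw [hrd a ha, hro b hb]; norm_num)
      · intro a ha b hb
        rcases List.mem_append.1 hb with hb | hb
        · exact Or.inl (by rw [hrf a ha, hrd b hb]; norm_num)
        · exact Or.inl (by rw [hrf a ha, hro b hb]; norm_num)
    · -- permutation: sorted2 files ~ sf ++ sd ++ so
      have e1 : (files.filter (fun f => !(PySem.Str.startswith f "figures/"))).filter
          (fun f => PySem.Str.startswith f "data/") = data := by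
        rw [List.filter_filter, hdatdef]
        apply List.filter_congr
        intro x _
        show (PySem.Str.startswith x "data/" && !PySem.Str.startswith x "figures/")
            = PySem.Str.startswith x "data/"
        cases hd : PySem.Str.startswith x "data/"
        · rw [Bool.false_and]
        · have hf : PySem.Str.startswith x "figures/" = false := by
            cases hfg : PySem.Str.startswith x "figures/"
            · rfl
            · rw [pv_fig_not_data x hfg] at hd; exact absurd hd (by simp)
          rw [Bool.true_and, hf]
          rfl
      have e2 : (files.filter (fun f => !(PySem.Str.startswith f "figures/"))).filter
          (fun f => !(PySem.Str.startswith f "data/")) = other := by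
        rw [List.filter_filter, hothdef]
        apply List.filter_congr
        intro x _
        show (!PySem.Str.startswith x "data/" && !PySem.Str.startswith x "figures/")
            = !(PySem.Str.startswith x "figures/" || PySem.Str.startswith x "data/")
        cases PySem.Str.startswith x "figures/" <;> cases PySem.Str.startswith x "data/" <;> rfl
      have hpart : (figures ++ (data ++ other)).Perm files := by
        have p2 : (data ++ other).Perm (files.filter (fun f => !(PySem.Str.startswith f "figures/"))) := by
          rw [← e1, ← e2]
          exact List.filter_append_perm _ _
        exact (List.Perm.append_left figures p2).trans (List.filter_append_perm _ files)
      have h3 : (sf ++ (sd ++ so)).Perm (figures ++ (data ++ other)) :=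
        List.Perm.append (PySem.List.sorted_perm figures (fun x => x) false)
          (List.Perm.append (PySem.List.sorted_perm data (fun x => x) false)
            (PySem.List.sorted_perm other (fun x => x) false))
      have h4 : (PySem.List.sorted2 files pvRank (fun x => x) false).Perm (sf ++ (sd ++ so)) :=
        ((PySem.List.sorted2_perm files pvRank (fun x => x) false).trans hpart.symm).trans h3.symm
      simpa [List.append_assoc] using h4
  -- rewrite B's scan over the concatenation, block by block
  rw [hkey, List.foldl_append, List.foldl_append]
  rw [show ("### Figures" : String) = pvHeader 0 from rfl,
      show ("### Data Files" : String) = pvHeader 1 from rfl,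
      show ("### Other" : String) = pvHeader 2 from rfl]
  rw [hsf, hsd, hso]
  rw [pv_Ablock 0 figures, pv_Ablock 1 data, pv_Ablock 2 other]
  rw [← hsf, ← hsd, ← hso]
  rw [pv_scan_block 0 sf hrf none (by simp) ["## Generated Files"]]
  have hp1 : (if sf = [] then (none : Option Int) else some 0) ≠ some 1 := by
    split_ifs <;> simp
  rw [pv_scan_block 1 sd hrd _ hp1]
  have hp2 : (if sd = [] then (if sf = [] then (none : Option Int) else some 0) else some 1) ≠ some 2 := by
    split_ifs <;> simp
  rw [pv_scan_block 2 so hro _ hp2]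

-- ===== VERDICT =====
theorem generate_files_section_py_spec : Claim_equal_generate_files_section_py := by
  intro files _
  exact generate_files_section_py_eq_alt files
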